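-- pv_equiv track=rewrite | github.com/MiloszBoghe/School-Y1- | IT Essentials/IT-essentials Oefeningen/H7_Lists/voorbeelden/extra 7.9.py | heartrate_difference
-- ===== SOURCE A (Python) =====
-- def heartrate_difference(list):
--     difference = []
--     for j in range(len(list[0])):
--         kl = list[0][j]
--         gr = list[0][j]
--         for i in range(1, len(list)):
--             if list[i][j] > gr:
--                 gr = list[i][j]
--             elif list[i][j] < kl:
--                 kl = list[i][j]
--         difference.append(gr-kl)
--     return difference
-- ===== SOURCE B (Python) =====
-- def heartrate_difference(list):
--     # Single row-wise streaming pass: keep one (min, max) pair per column and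
--     # update all pairs with each row, instead of A's column-outer nested scan.
--     pairs = [(v, v) for v in list[0]]
--     for row in list[1:]:
--         pairs = [(min(lo, v), max(hi, v)) for (lo, hi), v in zip(pairs, row)]
--     return [hi - lo for lo, hi in pairs]
-- ===== Notes on version B (the rewrite author's own statement) =====
-- stated objective: alternative
-- what changed: Instead of A's column-outer loop that re-scans all rows per column with gr/kl trackers, B streams the rows once, maintaining a list of per-column (min,max) accumulator pairs updated wholesale by each row, then maps the pairs to differences.
import Mathlib
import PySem

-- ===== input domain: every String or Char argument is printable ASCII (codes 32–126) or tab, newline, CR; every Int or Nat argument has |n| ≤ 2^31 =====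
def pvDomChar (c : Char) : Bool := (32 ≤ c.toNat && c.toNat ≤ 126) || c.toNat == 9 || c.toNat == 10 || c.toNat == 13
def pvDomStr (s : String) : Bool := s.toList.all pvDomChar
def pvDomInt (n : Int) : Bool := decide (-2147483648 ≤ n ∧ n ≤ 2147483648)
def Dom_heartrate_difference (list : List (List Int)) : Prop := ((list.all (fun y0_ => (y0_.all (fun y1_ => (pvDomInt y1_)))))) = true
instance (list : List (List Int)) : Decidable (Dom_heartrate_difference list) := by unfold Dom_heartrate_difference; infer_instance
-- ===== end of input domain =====

-- B replaces A's column-outer nested scan by a single row-wise streaming pass that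
-- maintains a list of per-column (min, max) accumulator pairs; same cost, different traversal.

-- ===== PORT A =====
def heartrate_difference (list : List (List Int)) : List Int :=
  (PySem.List.pyRange 0 ((PySem.List.pyGetD list 0 []).length : Int) 1).foldl
    (fun difference j =>
      let kl : Int := PySem.List.pyGetD (PySem.List.pyGetD list 0 []) j 0
      let gr : Int := PySem.List.pyGetD (PySem.List.pyGetD list 0 []) j 0
      let p : Int × Int :=
        (PySem.List.pyRange 1 (list.length : Int) 1).foldl
          (fun (s : Int × Int) i =>
            if PySem.List.pyGetD (PySem.List.pyGetD list i []) j 0 > s.2 then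
              (s.1, PySem.List.pyGetD (PySem.List.pyGetD list i []) j 0)
            else if PySem.List.pyGetD (PySem.List.pyGetD list i []) j 0 < s.1 then
              (PySem.List.pyGetD (PySem.List.pyGetD list i []) j 0, s.2)
            else s)
          (kl, gr)
      difference ++ [p.2 - p.1]) []

-- ===== PORT B =====
-- transcription of Source B: pairs = [(v,v) for v in list[0]]; for row in list[1:] (= drop 1,
-- exact for the nonnegative slice 1:): pairs = [(min(lo,v),max(hi,v)) for (lo,hi),v in zip(pairs,row)]
def heartrate_difference_alt (list : List (List Int)) : List Int :=
  let pairs0 : List (Int × Int) := (PySem.List.pyGetD list 0 []).map (fun v => (v, v))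
  let pairs : List (Int × Int) :=
    (list.drop 1).foldl
      (fun (pairs : List (Int × Int)) row =>
        (pairs.zip row).map (fun pv => (min pv.1.1 pv.2, max pv.1.2 pv.2)))
      pairs0
  pairs.map (fun p => p.2 - p.1)

-- ===== PRECONDITION & SPEC =====
-- Pre_ excludes exactly the inputs where the Python A raises IndexError: the empty outer
-- list (list[0] fails) and ragged inputs with a row shorter than the first row.
def Pre_heartrate_difference (list : List (List Int)) : Prop :=
  list ≠ [] ∧ ∀ r ∈ list, (list.headD []).length ≤ r.length
instance (list : List (List Int)) : Decidable (Pre_heartrate_difference list) := by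
  unfold Pre_heartrate_difference; infer_instance
def pvWitness_heartrate_difference : List (List Int) := [[3, 1], [0, 5], [2, 2]]

def Spec_heartrate_difference (list : List (List Int)) (out : List Int) : Prop :=
  out = heartrate_difference_alt list
instance (list : List (List Int)) (out : List Int) : Decidable (Spec_heartrate_difference list out) := by
  unfold Spec_heartrate_difference; infer_instance

-- ===== CLAIM (what is proved, stated in full; the proofs are below) =====
def Claim_equal_heartrate_difference : Prop :=
  ∀ (list : List (List Int)), Dom_heartrate_difference list →
    Pre_heartrate_difference list →
    Spec_heartrate_difference list (heartrate_difference list)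

-- ===== LEMMAS AND PROOFS =====

-- A's inner elif-loop computes the running (min, max) pair, provided kl ≤ gr.
theorem foldl_minmax (xs : List (List Int)) (v : List Int → Int) :
    ∀ (kl gr : Int), kl ≤ gr →
      xs.foldl (fun (s : Int × Int) r =>
          if v r > s.2 then (s.1, v r)
          else if v r < s.1 then (v r, s.2) else s) (kl, gr)
      = (xs.foldl (fun a r => min a (v r)) kl, xs.foldl (fun a r => max a (v r)) gr) := by
  induction xs with
  | nil => intro kl gr _; simp
  | cons x t ih =>
      intro kl gr hle
      simp only [List.foldl_cons]
      by_cases h1 : v x > gr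
      · simp only [if_pos h1]
        rw [min_eq_left (by omega), max_eq_right (by omega)]
        exact ih kl (v x) (by omega)
      · simp only [if_neg h1]
        by_cases h2 : v x < kl
        · simp only [if_pos h2]
          rw [min_eq_right (by omega), max_eq_left (by omega)]
          exact ih (v x) gr (by omega)
        · simp only [if_neg h2]
          rw [min_eq_left (by omega), max_eq_left (by omega)]
          exact ih kl gr hle

-- one row-step of B on a range-shaped pair list, for a row long enough
theorem stepB_eq (n : Nat) (f : Nat → Int × Int) (r : List Int) (h : n ≤ r.length) :
    (((List.range n).map f).zip r).map (fun pv => (min pv.1.1 pv.2, max pv.1.2 pv.2))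
      = (List.range n).map (fun k => (min (f k).1 (r.getD k 0), max (f k).2 (r.getD k 0))) := by
  apply List.ext_getElem
  · simp; omega
  · intro k h1 h2
    have hk : k < n := by simpa using h2
    have hkr : k < r.length := lt_of_lt_of_le hk h
    simp [List.getElem_zip, List.getElem_map, List.getElem_range, List.getD, List.getElem?_eq_getElem hkr]

-- B's row fold, started on a range-shaped pair list, computes per-column (min, max) folds.
theorem foldB (rows : List (List Int)) (n : Nat) :
    ∀ (lo hi : Nat → Int), (∀ r ∈ rows, n ≤ r.length) →
      rows.foldl
        (fun (pairs : List (Int × Int)) row =>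
          (pairs.zip row).map (fun pv => (min pv.1.1 pv.2, max pv.1.2 pv.2)))
        ((List.range n).map (fun k => (lo k, hi k)))
      = (List.range n).map (fun k =>
          (rows.foldl (fun a r => min a (r.getD k 0)) (lo k),
           rows.foldl (fun a r => max a (r.getD k 0)) (hi k))) := by
  induction rows with
  | nil => intro lo hi _; simp
  | cons r rs ih =>
      intro lo hi hall
      simp only [List.foldl_cons]
      rw [stepB_eq n (fun k => (lo k, hi k)) r (hall r (by simp))]
      exact ih (fun k => min (lo k) (r.getD k 0)) (fun k => max (hi k) (r.getD k 0))
        (fun r' hr' => hall r' (by simp [hr']))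

-- the initial pair list [(v,v) for v in r0] is range-shaped
theorem pairs0_eq (r0 : List Int) :
    r0.map (fun v => (v, v))
      = (List.range r0.length).map (fun k => (r0.getD k 0, r0.getD k 0)) := by
  apply List.ext_getElem
  · simp
  · intro k h1 h2
    have hk : k < r0.length := by simpa using h1
    simp [List.getD, List.getElem?_eq_getElem hk]

theorem heartrate_difference_spec : Claim_equal_heartrate_difference := by
  intro list _ hpre
  obtain ⟨hne, hall⟩ := hpre
  cases list with
  | nil => exact absurd rfl hne
  | cons r0 rest =>
    unfold Spec_heartrate_difference
    set n := r0.length with hn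
    have hlen : ∀ r ∈ rest, n ≤ r.length := by
      intro r hr
      have h := hall r (by simp [hr]); simpa [hn] using h
    -- B side
    have hB : heartrate_difference_alt (r0 :: rest) =
        (List.range n).map (fun k =>
          (rest.foldl (fun a r => max a (r.getD k 0)) (r0.getD k 0)) -
          (rest.foldl (fun a r => min a (r.getD k 0)) (r0.getD k 0))) := by
      unfold heartrate_difference_alt
      have hget0 : PySem.List.pyGetD (r0 :: rest) 0 [] = r0 := by
        simpa using PySem.List.pyGetD_natCast (r0 :: rest) 0 []
      simp only [hget0, List.drop_succ_cons, List.drop_zero]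
      rw [pairs0_eq r0, ← hn, foldB rest n _ _ hlen, List.map_map]
      rfl
    -- A side
    unfold heartrate_difference
    have hget0 : PySem.List.pyGetD (r0 :: rest) 0 [] = r0 := by
      simpa using PySem.List.pyGetD_natCast (r0 :: rest) 0 []
    rw [hget0]
    rw [show ((r0.length : Int)) = ((n : Nat) : Int) by simp [hn]]
    rw [PySem.List.pyRange_zero_natCast]
    rw [PySem.List.foldl_append_singleton_eq_map]
    rw [hB, List.map_map]
    apply List.map_congr_left
    intro k hk
    simp only [List.mem_range] at hk
    simp only [Function.comp]
    have hinner := PySem.List.foldl_pyRange_pyGetD (a := 1) (xs := (r0 :: rest)) (d := ([] : List Int))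
      (f := fun (s : Int × Int) (r : List Int) =>
        if PySem.List.pyGetD r (k : Int) 0 > s.2 then (s.1, PySem.List.pyGetD r (k : Int) 0)
        else if PySem.List.pyGetD r (k : Int) 0 < s.1 then (PySem.List.pyGetD r (k : Int) 0, s.2)
        else s)
      (init := (PySem.List.pyGetD r0 (k : Int) 0, PySem.List.pyGetD r0 (k : Int) 0))
      (by norm_num)
    simp only [PySem.List.len_eq, show ((1 : Int)).toNat = 1 from rfl,
               List.drop_succ_cons, List.drop_zero] at hinner
    rw [hinner]
    rw [foldl_minmax rest (fun r => PySem.List.pyGetD r (k : Int) 0) _ _ le_rfl]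
    simp only [PySem.List.pyGetD_natCast]
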